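-- pv_equiv track=rewrite | github.com/ertucode/Youtube_Downloader | Youtube_Downloader_v3.py | convert_to_win_path
-- ===== SOURCE A (Python) =====
-- def convert_to_win_path(title):
--     """ Fix the title so it can be a Windows path"""
--     chars = "\"\':<>/\\*?|"
--     for c in chars:
--         if c in title:
--             title = title.replace(c,"_")
--     if title:
--         while title[-1] == ".":
--             title = title[:-1]
--     return title
-- ===== SOURCE B (Python) =====
-- def convert_to_win_path(title):
--     """ Fix the title so it can be a Windows path"""
--     forbidden = set("\"\':<>/\\*?|")
--     cleaned = "".join("_" if c in forbidden else c for c in title)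
--     return cleaned.rstrip(".")
-- ===== Notes on version B (the rewrite author's own statement) =====
-- stated objective: idiomatic
-- what changed: One character-wise pass with a forbidden-set lookup builds the sanitized string, then rstrip('.') trims trailing dots, instead of ten repeated full-string replace scans followed by a manual while loop popping the last character.
-- outside the precondition, e.g. on convert_to_win_path('.'): A raises IndexError, B returns ''
import Mathlib
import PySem

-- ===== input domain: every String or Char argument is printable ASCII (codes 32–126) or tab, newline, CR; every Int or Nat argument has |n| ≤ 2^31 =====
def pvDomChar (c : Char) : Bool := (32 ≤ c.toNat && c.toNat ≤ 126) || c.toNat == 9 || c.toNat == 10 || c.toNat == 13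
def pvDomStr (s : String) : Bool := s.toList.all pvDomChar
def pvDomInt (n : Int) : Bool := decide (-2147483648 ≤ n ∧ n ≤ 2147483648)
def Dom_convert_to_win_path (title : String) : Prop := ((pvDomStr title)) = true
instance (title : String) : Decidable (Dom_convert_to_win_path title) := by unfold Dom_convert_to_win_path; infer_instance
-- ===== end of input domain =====

-- B: one character-wise pass with a forbidden-set lookup plus rstrip('.'), instead of A's
-- ten repeated full-string replace scans followed by a manual last-character-popping loop (idiomatic).

-- ===== PORT A =====

-- needed by the port's termination proof (title[:-1] drops the last character)
theorem pvSliceNegOne (s : List Char) : PySem.List.slice s none (some (-1)) = s.dropLast := by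
  have := PySem.Str.slice_to_neg_one (String.ofList s)
  simpa using this

-- while title[-1] == ".": title = title[:-1]
-- (title[-1] on the empty string is an IndexError in Python: then the condition is not `some '.'`
--  and the recursion stops — unreachable under Pre_)
def pvStripDotsA (s : List Char) : List Char :=
  if h : PySem.List.pyGet? s (-1) = some '.' then
    pvStripDotsA (PySem.List.slice s none (some (-1)))
  else s
termination_by s.length
decreasing_by
  have hne : s ≠ [] := by
    intro hs; subst hs; simp [PySem.List.pyGet?, PySem.List.pyIdx?] at h
  rw [pvSliceNegOne, List.length_dropLast]
  have := List.length_pos_iff.2 hne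
  omega

def convert_to_win_path (title : String) : String :=
  -- chars = "\"':<>/\\*?|" ; for c in chars: if c in title: title = title.replace(c,"_")
  let chars : List Char := "\"':<>/\\*?|".toList
  let t := chars.foldl
    (fun t c => if PySem.Chars.isIn [c] t then PySem.Chars.replace t [c] ['_'] else t)
    title.toList
  -- if title: while title[-1] == ".": title = title[:-1]
  let t := if t ≠ [] then pvStripDotsA t else t
  String.ofList t

-- ===== PORT B =====
def convert_to_win_path_alt (title : String) : String :=
  let forbidden : PySem.Set Char := PySem.Set.ofList "\"':<>/\\*?|".toList
  let cleaned := title.toList.map (fun c => if forbidden.contains c then '_' else c)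
  -- .rstrip(".") — drop trailing '.' characters (exact for this single strip character)
  String.ofList ((cleaned.reverse.dropWhile (· == '.')).reverse)

-- ===== PRECONDITION & SPEC =====
-- Pre_ excludes nonempty titles consisting entirely of '.', on which Python A raises IndexError
-- (the while loop empties the string and then evaluates title[-1]).
def Pre_convert_to_win_path (title : String) : Prop :=
  ¬ (title ≠ "" ∧ title.toList.all (· == '.') = true)
instance (title : String) : Decidable (Pre_convert_to_win_path title) := by
  unfold Pre_convert_to_win_path; infer_instance

def pvWitness_convert_to_win_path : String := "a.b?.."

def Spec_convert_to_win_path (title : String) (out : String) : Prop := out = convert_to_win_path_alt title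
instance (title : String) (out : String) : Decidable (Spec_convert_to_win_path title out) := by unfold Spec_convert_to_win_path; infer_instance

-- ===== CLAIM (what is proved, stated in full; the proofs are below) =====
def Claim_equal_convert_to_win_path : Prop := ∀ (title : String), Dom_convert_to_win_path title → Pre_convert_to_win_path title → Spec_convert_to_win_path title (convert_to_win_path title)

-- ===== LEMMAS AND PROOFS =====

-- replace with one-character old/new is a character map
theorem pvGoSingle (c d : Char) : ∀ (fuel : Nat) (l acc : List Char), l.length ≤ fuel →
    PySem.Chars.replace.go [c] [d] fuel l acc = acc.reverse ++ l.map (fun x => if x == c then d else x) := by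
  intro fuel
  induction fuel with
  | zero => intro l acc h; simp at h; subst h; simp [PySem.Chars.replace.go]
  | succ n ih =>
    intro l acc h
    match l with
    | [] => simp [PySem.Chars.replace.go]
    | x :: t =>
      simp only [PySem.Chars.replace.go]
      have ht : t.length ≤ n := by simpa using h
      by_cases hx : x = c
      · subst hx
        simp [List.isPrefixOf, ih t (d :: acc) ht]
      · simp only [List.isPrefixOf, Bool.and_true, beq_iff_eq]
        rw [if_neg (by exact fun hcx => hx hcx.symm)]
        simp [ih t (x :: acc) ht, hx]

theorem pvReplaceSingle (c d : Char) (s : List Char) :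
    PySem.Chars.replace s [c] [d] = s.map (fun x => if x == c then d else x) := by
  have := pvGoSingle c d s.length s [] (Nat.le_refl _)
  simpa [PySem.Chars.replace] using this

-- each step of A's for-loop is the map, whether or not the `c in title` guard fires
theorem pvStepEqMap (c : Char) (t : List Char) :
    (if PySem.Chars.isIn [c] t then PySem.Chars.replace t [c] ['_'] else t)
      = t.map (fun x => if x == c then '_' else x) := by
  by_cases h : PySem.Chars.isIn [c] t
  · simp only [h, if_true, pvReplaceSingle]
  · rw [if_neg h]
    have hmem : c ∉ t := by
      intro hc
      obtain ⟨l1, l2, rfl⟩ := List.append_of_mem hc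
      exact h ((PySem.Chars.isIn_iff_infix _ _).2 ⟨l1, l2, by simp⟩)
    have he : ∀ x ∈ t, (if x == c then '_' else x) = x := by
      intro x hx
      simp [show x ≠ c from fun e => hmem (e ▸ hx)]
    rw [List.map_congr_left he]
    simp

-- A's for-loop over the forbidden characters is one map over the title
theorem pvFoldEqMap (C : List Char) (h_ : '_' ∉ C) (s : List Char) :
    C.foldl (fun t c => if PySem.Chars.isIn [c] t then PySem.Chars.replace t [c] ['_'] else t) s
      = s.map (fun x => if x ∈ C then '_' else x) := by
  induction C generalizing s with
  | nil => simp
  | cons c C' ih =>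
    have hC' : '_' ∉ C' := fun hmem => h_ (List.mem_cons_of_mem _ hmem)
    rw [List.foldl_cons, pvStepEqMap, ih hC', List.map_map]
    apply List.map_congr_left
    intro x _
    by_cases hx : x = c
    · subst hx
      simp [Function.comp, hC']
    · by_cases hx' : x ∈ C'
      · simp [Function.comp, hx, hx']
      · simp [Function.comp, hx, hx']

-- title[-1] of a nonempty string is its last character
theorem pvPyGetLast (t : List Char) (a : Char) :
    PySem.List.pyGet? (t ++ [a]) (-1 : Int) = some a := by
  simp [PySem.List.pyGet?, PySem.List.pyIdx?]

-- A's while loop is rstrip('.')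
theorem pvStripEqRstrip (s : List Char) :
    pvStripDotsA s = (s.reverse.dropWhile (· == '.')).reverse := by
  induction s using List.reverseRecOn with
  | nil => rw [pvStripDotsA]; simp [PySem.List.pyGet?, PySem.List.pyIdx?]
  | append_singleton t a ih =>
    rw [pvStripDotsA]
    by_cases ha : a = '.'
    · subst ha
      rw [dif_pos (pvPyGetLast t '.'), pvSliceNegOne, List.dropLast_concat]
      simpa using ih
    · rw [dif_neg (by rw [pvPyGetLast]; exact fun e => ha (Option.some.inj e))]
      simp [ha]

-- ===== VERDICT (by name: the statement is the Claim_ definition above) =====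
theorem convert_to_win_path_spec : Claim_equal_convert_to_win_path := by
  intro title _ _
  unfold Spec_convert_to_win_path convert_to_win_path convert_to_win_path_alt
  simp only []
  rw [pvFoldEqMap _ (by decide)]
  have hmap :
      title.toList.map (fun x => if x ∈ "\"':<>/\\*?|".toList then '_' else x)
        = title.toList.map
            (fun c => if (PySem.Set.ofList "\"':<>/\\*?|".toList).contains c then '_' else c) := by
    apply List.map_congr_left
    intro x _
    have hc : (PySem.Set.ofList "\"':<>/\\*?|".toList).contains x = true ↔ x ∈ "\"':<>/\\*?|".toList := by
      simp [PySem.Set.mem_ofList]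
    by_cases hx : x ∈ "\"':<>/\\*?|".toList
    · rw [if_pos hx, if_pos (hc.2 hx)]
    · rw [if_neg hx, if_neg (fun hcx => hx (hc.1 hcx))]
  rw [hmap]
  set cl := title.toList.map
    (fun c => if (PySem.Set.ofList "\"':<>/\\*?|".toList).contains c then '_' else c) with hcl
  by_cases hne : cl = []
  · simp [hne]
  · simp [hne, pvStripEqRstrip]
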